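-- pv_equiv track=rewrite | github.com/sueszli/vector-database-benchmark | dataset/python-mutated/min_cost_coloring.py | min_cost_coloring
-- ===== SOURCE A (Python) =====
-- import math
--
-- def min_cost_coloring(dp):
--     if False:
--         i = 10
--         return i + 15
--     n = len(dp)
--     if n == 0:
--         return 0
--     m = len(dp[0])
--     if m < 2:
--         return -1
--     prev_min = [(0, -1), (0, -1)]
--     for i in range(n):
--         curr_min = [(math.inf, -1), (math.inf, -1)]
--         for j in range(m):
--             if j != prev_min[0][1]:
--                 dp[i][j] += prev_min[0][0]
--             else:
--                 dp[i][j] += prev_min[1][0]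
--             if curr_min[0][0] > dp[i][j]:
--                 curr_min[1] = curr_min[0]
--                 curr_min[0] = (dp[i][j], j)
--             elif curr_min[1][0] > dp[i][j]:
--                 curr_min[1] = (dp[i][j], j)
--         prev_min = curr_min
--     return min(dp[n - 1])
-- ===== SOURCE B (Python) =====
-- def min_cost_coloring(dp):
--     n = len(dp)
--     if n == 0:
--         return 0
--     m = len(dp[0])
--     if m < 2:
--         return -1
--     for i in range(1, n):
--         prev = dp[i - 1]
--         for j in range(m):
--             dp[i][j] += min(prev[k] for k in range(m) if k != j)
--     return min(dp[n - 1])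
-- ===== Notes on version B (the rewrite author's own statement) =====
-- stated objective: simpler
-- what changed: Replaces the top-two-minima tracking (prev_min/curr_min tuples with an inf sentinel) by the plain DP that for each cell takes an explicit min over the previous accumulated row excluding the same column; row 0 is left untouched instead of being run through the loop with a dummy prev_min.
import Mathlib
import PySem

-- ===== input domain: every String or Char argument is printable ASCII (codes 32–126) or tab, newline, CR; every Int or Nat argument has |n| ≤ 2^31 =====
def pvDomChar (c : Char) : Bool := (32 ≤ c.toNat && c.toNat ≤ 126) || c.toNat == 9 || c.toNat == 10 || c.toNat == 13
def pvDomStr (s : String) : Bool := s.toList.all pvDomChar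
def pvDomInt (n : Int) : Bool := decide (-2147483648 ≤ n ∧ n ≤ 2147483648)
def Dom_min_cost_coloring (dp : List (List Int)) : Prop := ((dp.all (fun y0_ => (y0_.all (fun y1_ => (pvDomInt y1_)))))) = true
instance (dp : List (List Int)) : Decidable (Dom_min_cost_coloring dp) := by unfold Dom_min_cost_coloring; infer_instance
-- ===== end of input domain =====

-- B replaces A's top-two-minima bookkeeping by a plain inner min-scan over the previous
-- accumulated row (objective: simpler). Both Pythons mutate dp in place identically; the
-- equivalence proved here is about the return value.

-- ===== PORT A =====
-- curr_min/prev_min entries: (value, index); math.inf is modelled as `none`.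
def pvInfGt : Option Int → Int → Bool
  | none, _ => true
  | some a, x => decide (x < a)

def pvTTStep (cm : (Option Int × Int) × (Option Int × Int)) (v j : Int) :
    (Option Int × Int) × (Option Int × Int) :=
  if pvInfGt cm.1.1 v then ((some v, j), cm.1)
  else if pvInfGt cm.2.1 v then (cm.1, (some v, j))
  else cm

def pvAddTerm (pm : (Option Int × Int) × (Option Int × Int)) (j : Int) : Int :=
  if j ≠ pm.1.2 then pm.1.1.getD 0 else pm.2.1.getD 0

-- the body of `for j in range(m)`: builds the mutated row and curr_min
def pvRowA (m : Nat) (pm : (Option Int × Int) × (Option Int × Int)) (r : List Int) :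
    List Int × ((Option Int × Int) × (Option Int × Int)) :=
  let st := (List.range m).foldl
    (fun st j =>
      let v := r.getD j 0 + pvAddTerm pm (j : Int)
      (st.1 ++ [v], pvTTStep st.2 v (j : Int)))
    (([] : List Int), ((none, -1), (none, -1)))
  (st.1 ++ r.drop m, st.2)

def min_cost_coloring (dp : List (List Int)) : Int :=
  if dp.length = 0 then 0
  else
    let m := (dp.headD []).length
    if m < 2 then (-1)
    else
      let st := dp.foldl (fun st r => pvRowA m st.2 r)
        (([] : List Int), ((some 0, -1), (some 0, -1)))
      (PySem.List.min? st.1 (fun y => y)).getD 0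

-- ===== PORT B =====
-- Python's min of a nonempty list (B only applies it to nonempty lists)
def pvMin (xs : List Int) : Int :=
  match xs with
  | [] => 0
  | x :: t => t.foldl min x

-- min(prev[k] for k in range(m) if k != j)
def pvMinExcept (prev : List Int) (m j : Nat) : Int :=
  pvMin ((List.range m).filterMap (fun k => if k = j then none else some (prev.getD k 0)))

def pvRowB (m : Nat) (prev r : List Int) : List Int :=
  (List.range m).map (fun j => r.getD j 0 + pvMinExcept prev m j) ++ r.drop m

def min_cost_coloring_alt (dp : List (List Int)) : Int :=
  match dp with
  | [] => 0
  | r0 :: rest =>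
    if r0.length < 2 then (-1)
    else
      let last := rest.foldl (fun prev r => pvRowB r0.length prev r) r0
      (PySem.List.min? last (fun y => y)).getD 0

-- ===== PRECONDITION & SPEC =====
-- Pre_ excludes only ragged inputs on which some row is shorter than row 0: there the
-- Python A raises IndexError (dp[i][j] for j in range(len(dp[0]))).
def Pre_min_cost_coloring (dp : List (List Int)) : Prop :=
  dp = [] ∨ (dp.headD []).length < 2 ∨ ∀ r ∈ dp, (dp.headD []).length ≤ r.length
instance (dp : List (List Int)) : Decidable (Pre_min_cost_coloring dp) := by
  unfold Pre_min_cost_coloring; infer_instance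

def pvWitness_min_cost_coloring : List (List Int) := [[1, 2], [3, 4]]

def Spec_min_cost_coloring (dp : List (List Int)) (out : Int) : Prop := out = min_cost_coloring_alt dp
instance (dp : List (List Int)) (out : Int) : Decidable (Spec_min_cost_coloring dp out) := by unfold Spec_min_cost_coloring; infer_instance

-- ===== CLAIM (what is proved, stated in full; the proofs are below) =====
def Claim_equal_min_cost_coloring : Prop := ∀ (dp : List (List Int)), Dom_min_cost_coloring dp → Pre_min_cost_coloring dp → Spec_min_cost_coloring dp (min_cost_coloring dp)

-- ===== LEMMAS AND PROOFS =====

-- proof-only: first index of the minimum, and the min with that position removed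
def pvArg (xs : List Int) : Nat := xs.idxOf (pvMin xs)
def pvSnd (xs : List Int) : Int := pvMin (xs.eraseIdx (pvArg xs))

-- proof-only: A's inner scan as a function of the list of row values
def pvTTGo : ((Option Int × Int) × (Option Int × Int)) → Nat → List Int →
    ((Option Int × Int) × (Option Int × Int))
  | cm, _, [] => cm
  | cm, t, v :: vs => pvTTGo (pvTTStep cm v (t : Int)) (t + 1) vs

def pvTTInv (xs : List Int) (cm : (Option Int × Int) × (Option Int × Int)) : Prop :=
  cm.1.1 = some (pvMin xs) ∧ cm.1.2 = (pvArg xs : Int) ∧ cm.2.1 = some (pvSnd xs)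

theorem pvTTGo_append (vs : List Int) (cm : (Option Int × Int) × (Option Int × Int))
    (t : Nat) (x : Int) :
    pvTTGo cm t (vs ++ [x]) = pvTTStep (pvTTGo cm t vs) x ((t + vs.length : Nat) : Int) := by
  induction vs generalizing cm t with
  | nil => simp [pvTTGo]
  | cons v vs ih => simp [pvTTGo, ih, Nat.add_assoc, Nat.add_comm 1]

theorem foldlMin_le_init (t : List Int) (a : Int) : t.foldl min a ≤ a := by
  induction t generalizing a with
  | nil => simp
  | cons x t ih => exact le_trans (ih _) (min_le_left _ _)

theorem foldlMin_le (t : List Int) (a y : Int) (hy : y ∈ t) : t.foldl min a ≤ y := by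
  induction t generalizing a with
  | nil => simp at hy
  | cons x t ih =>
    rw [List.foldl_cons]
    rcases List.mem_cons.mp hy with h | h
    · subst h; exact le_trans (foldlMin_le_init _ _) (min_le_right _ _)
    · exact ih _ h

theorem foldlMin_mem (t : List Int) (a : Int) : t.foldl min a = a ∨ t.foldl min a ∈ t := by
  induction t generalizing a with
  | nil => simp
  | cons x t ih =>
    rw [List.foldl_cons]
    rcases ih (min a x) with h | h
    · rcases le_total a x with hax | hax
      · left; rw [h, min_eq_left hax]
      · right; rw [h, min_eq_right hax]; exact List.mem_cons_self
    · right; exact List.mem_cons_of_mem _ h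

theorem pvMin_le (xs : List Int) (y : Int) (hy : y ∈ xs) : pvMin xs ≤ y := by
  cases xs with
  | nil => simp at hy
  | cons x t =>
    rcases List.mem_cons.mp hy with h | h
    · subst h; exact foldlMin_le_init _ _
    · exact foldlMin_le _ _ _ h

theorem pvMin_mem (xs : List Int) (h : xs ≠ []) : pvMin xs ∈ xs := by
  cases xs with
  | nil => exact absurd rfl h
  | cons x t =>
    rcases foldlMin_mem t x with h' | h'
    · simp [pvMin, h']
    · exact List.mem_cons_of_mem _ h'

theorem pvMin_append (xs : List Int) (x : Int) (h : xs ≠ []) :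
    pvMin (xs ++ [x]) = min (pvMin xs) x := by
  cases xs with
  | nil => exact absurd rfl h
  | cons a t => simp [pvMin, List.foldl_append]

theorem pvArg_lt (xs : List Int) (h : xs ≠ []) : pvArg xs < xs.length :=
  List.idxOf_lt_length_of_mem (pvMin_mem xs h)

theorem getElem_pvArg (xs : List Int) (h : xs ≠ []) :
    xs[pvArg xs]'(pvArg_lt xs h) = pvMin xs :=
  List.getElem_idxOf _

theorem pvArg_append_lt (xs : List Int) (x : Int) (h : xs ≠ []) (hx : x < pvMin xs) :
    pvArg (xs ++ [x]) = xs.length := by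
  have hmin : pvMin (xs ++ [x]) = x := by
    rw [pvMin_append xs x h]; exact min_eq_right hx.le
  have hnm : x ∉ xs := fun hmem => absurd (pvMin_le xs x hmem) (not_le.mpr hx)
  unfold pvArg
  rw [hmin, List.idxOf_append, if_neg hnm]
  simp [List.idxOf_cons_self]

theorem pvArg_append_ge (xs : List Int) (x : Int) (h : xs ≠ []) (hx : pvMin xs ≤ x) :
    pvArg (xs ++ [x]) = pvArg xs := by
  have hmin : pvMin (xs ++ [x]) = pvMin xs := by
    rw [pvMin_append xs x h]; exact min_eq_left hx
  unfold pvArg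
  rw [hmin, List.idxOf_append, if_pos (pvMin_mem xs h)]

theorem tt_char (xs : List Int) (h : xs ≠ []) :
    (pvTTGo ((none, -1), (none, -1)) 0 xs).1 = (some (pvMin xs), (pvArg xs : Int)) ∧
    (pvTTGo ((none, -1), (none, -1)) 0 xs).2.1 =
      (if xs.length = 1 then none else some (pvSnd xs)) := by
  induction xs using List.reverseRecOn with
  | nil => exact absurd rfl h
  | append_singleton ys x ih =>
    by_cases hys : ys = []
    · subst hys
      simp [pvTTGo, pvTTStep, pvInfGt, pvMin, pvArg, List.idxOf_cons_self]
    · obtain ⟨ih1, ih2⟩ := ih hys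
      have hpos : 0 < ys.length := List.length_pos_of_ne_nil hys
      have e0 : (pvTTGo ((none, -1), (none, -1)) 0 ys).1.1 = some (pvMin ys) := by
        rw [ih1]
      rw [pvTTGo_append]
      have hlen2 : (ys ++ [x]).length ≠ 1 := by simp; omega
      by_cases hx : x < pvMin ys
      · -- new strict minimum, placed at index ys.length
        have hmin : pvMin (ys ++ [x]) = x := by
          rw [pvMin_append _ x hys]; exact min_eq_right hx.le
        have harg : pvArg (ys ++ [x]) = ys.length := pvArg_append_lt _ x hys hx
        have hc : pvInfGt (some (pvMin ys)) x = true := by simp [pvInfGt, hx]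
        have hsnd : pvSnd (ys ++ [x]) = pvMin ys := by
          unfold pvSnd
          rw [harg, List.eraseIdx_append_of_length_le (le_refl ys.length)]
          simp
        constructor
        · simp [pvTTStep, e0, hc, hmin, harg]
        · simp [pvTTStep, e0, ih1, hc, hys, hsnd]
      · rw [not_lt] at hx
        have hmin : pvMin (ys ++ [x]) = pvMin ys := by
          rw [pvMin_append _ x hys]; exact min_eq_left hx
        have harg : pvArg (ys ++ [x]) = pvArg ys := pvArg_append_ge _ x hys hx
        have hc : pvInfGt (some (pvMin ys)) x = false := by
          simp [pvInfGt]; exact hx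
        by_cases h1 : ys.length = 1
        · -- the previous list was a singleton: second slot was none, receives x
          obtain ⟨a, ha⟩ := List.length_eq_one_iff.mp h1
          have e2 : (pvTTGo ((none, -1), (none, -1)) 0 ys).2.1 = none := by
            rw [ih2]; simp [h1]
          have hc2 : pvInfGt (none : Option Int) x = true := by simp [pvInfGt]
          have hsnd : pvSnd (ys ++ [x]) = x := by
            unfold pvSnd
            rw [harg, ha]
            simp [pvArg, pvMin, List.idxOf_cons_self]
          constructor
          · simp [pvTTStep, e0, e2, hc, hc2, ih1, hmin, harg]
          · simp [pvTTStep, e0, e2, hc, hc2, hys, hsnd]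
        · -- the previous list had ≥ 2 entries: second slot holds pvSnd ys
          have e2 : (pvTTGo ((none, -1), (none, -1)) 0 ys).2.1
              = some (pvSnd ys) := by rw [ih2]; simp [h1]
          have hargl : pvArg ys < ys.length := pvArg_lt _ hys
          have herase : (ys ++ [x]).eraseIdx (pvArg ys)
              = ys.eraseIdx (pvArg ys) ++ [x] :=
            List.eraseIdx_append_of_lt_length hargl _
          have hne : ys.eraseIdx (pvArg ys) ≠ [] := by
            have hl := List.length_eraseIdx_of_lt hargl
            intro hc'
            rw [hc'] at hl
            simp at hl
            omega
          have hsnd : pvSnd (ys ++ [x]) = min (pvSnd ys) x := by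
            unfold pvSnd
            rw [harg, herase, pvMin_append _ _ hne]
          by_cases hS : x < pvSnd ys
          · have hc2 : pvInfGt (some (pvSnd ys)) x = true := by simp [pvInfGt, hS]
            constructor
            · simp [pvTTStep, e0, e2, hc, hc2, ih1, hmin, harg]
            · simp [pvTTStep, e0, e2, hc, hc2, hys, hsnd, min_eq_right hS.le]
          · rw [not_lt] at hS
            have hc2 : pvInfGt (some (pvSnd ys)) x = false := by
              simp [pvInfGt]; exact hS
            constructor
            · simp [pvTTStep, e0, e2, hc, hc2, ih1, hmin, harg]
            · simp [pvTTStep, e0, e2, hc, hc2, hys, hsnd, min_eq_left hS]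

theorem erase_min (xs : List Int) (j : Nat) (h2 : 2 ≤ xs.length) (hj : j < xs.length) :
    pvMin (xs.eraseIdx j) = if j = pvArg xs then pvSnd xs else pvMin xs := by
  by_cases hja : j = pvArg xs
  · simp [hja, pvSnd]
  · simp only [hja, if_false]
    have hne : xs ≠ [] := by intro hc; rw [hc] at h2; simp at h2
    have hi0 : pvArg xs < xs.length := pvArg_lt xs hne
    have hele : (xs.eraseIdx j).length = xs.length - 1 := List.length_eraseIdx_of_lt hj
    have hene : xs.eraseIdx j ≠ [] := by
      intro hc; rw [hc] at hele; simp at hele; omega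
    -- the overall minimum survives erasing a different index
    have hmem : pvMin xs ∈ xs.eraseIdx j := by
      by_cases hlt : pvArg xs < j
      · have hk : pvArg xs < (xs.eraseIdx j).length := by omega
        have heq : (xs.eraseIdx j)[pvArg xs]'hk = xs[pvArg xs]'hi0 := by
          rw [List.getElem_eraseIdx]
          simp [hlt]
        rw [← getElem_pvArg xs hne, ← heq]
        exact List.getElem_mem _
      · have hgt : j < pvArg xs := by omega
        have hk : pvArg xs - 1 < (xs.eraseIdx j).length := by omega
        have heq : (xs.eraseIdx j)[pvArg xs - 1]'hk = xs[pvArg xs]'hi0 := by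
          have hnl : ¬ pvArg xs - 1 < j := by omega
          rw [List.getElem_eraseIdx, dif_neg hnl]
          congr 1
          omega
        rw [← getElem_pvArg xs hne, ← heq]
        exact List.getElem_mem _
    have hle1 : pvMin (xs.eraseIdx j) ≤ pvMin xs := pvMin_le _ _ hmem
    have hle2 : pvMin xs ≤ pvMin (xs.eraseIdx j) :=
      pvMin_le _ _ ((List.eraseIdx_sublist xs j).subset (pvMin_mem _ hene))
    omega

theorem map_getD_range (xs : List Int) :
    (List.range xs.length).map (fun k => xs.getD k 0) = xs := by
  induction xs with
  | nil => simp
  | cons x t ih =>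
    rw [List.length_cons, List.range_succ_eq_map]
    simp only [List.map_cons, List.map_map]
    rw [show ((fun k => (x :: t).getD k 0) ∘ Nat.succ) = (fun k => t.getD k 0) from by
      funext k; rfl]
    simp only [ih]
    rfl

theorem range_filterMap_eraseIdx (xs : List Int) (j : Nat) :
    (List.range xs.length).filterMap
      (fun k => if k = j then none else some (xs.getD k 0)) = xs.eraseIdx j := by
  induction xs generalizing j with
  | nil => simp
  | cons x t ih =>
    rw [List.length_cons, List.range_succ_eq_map, List.filterMap_cons, List.filterMap_map]
    cases j with
    | zero =>
      rw [show ((fun k => if k = 0 then none else some ((x :: t).getD k 0)) ∘ Nat.succ)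
          = (some ∘ fun k => t.getD k 0) from by funext k; rfl]
      rw [List.filterMap_eq_map, map_getD_range]
      simp
    | succ jj =>
      rw [show ((fun k => if k = jj + 1 then none else some ((x :: t).getD k 0)) ∘ Nat.succ)
          = (fun k => if k = jj then none else some (t.getD k 0)) from by
        funext k; by_cases h : k = jj <;> simp [h]]
      rw [ih jj]
      simp [List.eraseIdx]

theorem rowA_split (m : Nat) (pm : (Option Int × Int) × (Option Int × Int)) (r : List Int) :
    pvRowA m pm r =
      ((List.range m).map (fun j => r.getD j 0 + pvAddTerm pm (j : Int)) ++ r.drop m,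
       pvTTGo ((none, -1), (none, -1)) 0
         ((List.range m).map (fun j => r.getD j 0 + pvAddTerm pm (j : Int)))) := by
  unfold pvRowA
  suffices h : ∀ n : Nat,
      (List.range n).foldl
        (fun st j =>
          (st.1 ++ [r.getD j 0 + pvAddTerm pm (j : Int)],
           pvTTStep st.2 (r.getD j 0 + pvAddTerm pm (j : Int)) (j : Int)))
        (([] : List Int), ((none, -1), (none, -1)))
      = ((List.range n).map (fun j => r.getD j 0 + pvAddTerm pm (j : Int)),
         pvTTGo ((none, -1), (none, -1)) 0
           ((List.range n).map (fun j => r.getD j 0 + pvAddTerm pm (j : Int)))) by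
    simp only [h m]
  intro n
  induction n with
  | zero => simp [pvTTGo]
  | succ n ih =>
    rw [List.range_succ, List.foldl_append, ih, List.map_append]
    simp only [List.foldl_cons, List.foldl_nil, List.map_cons, List.map_nil]
    rw [pvTTGo_append]
    simp
  
theorem main_loop (rest : List (List Int)) (m : Nat) (prevA prevB : List Int)
    (cm : (Option Int × Int) × (Option Int × Int))
    (hm : 2 ≤ m) (hpl : m ≤ prevB.length) (hrl : ∀ r ∈ rest, m ≤ r.length)
    (heq : prevA = prevB) (hinv : pvTTInv (prevB.take m) cm) :
    (rest.foldl (fun st r => pvRowA m st.2 r) (prevA, cm)).1 =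
      rest.foldl (fun prev r => pvRowB m prev r) prevB := by
  induction rest generalizing prevA prevB cm with
  | nil => simpa using heq
  | cons r rest ih =>
    obtain ⟨hinv1, hinv2, hinv3⟩ := hinv
    set xs := prevB.take m with hxs
    have hxslen : xs.length = m := by simp [hxs, hpl]
    have hxs2 : 2 ≤ xs.length := by omega
    -- the per-column values agree
    have hvals : ∀ j ∈ List.range m,
        r.getD j 0 + pvAddTerm cm (j : Int) = r.getD j 0 + pvMinExcept prevB m j := by
      intro j hj
      have hjm : j < m := List.mem_range.mp hj
      congr 1
      have hfil : (List.range m).filterMap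
          (fun k => if k = j then none else some (prevB.getD k 0))
          = xs.eraseIdx j := by
        rw [← range_filterMap_eraseIdx xs j, hxslen]
        apply List.filterMap_congr
        intro k hk
        have hkm : k < m := List.mem_range.mp hk
        by_cases hkj : k = j
        · simp [hkj]
        · simp only [hkj, ite_false]
          congr 1
          rw [hxs, List.getD_eq_getElem?_getD, List.getD_eq_getElem?_getD,
            List.getElem?_take_of_lt hkm]
      rw [pvMinExcept, hfil, erase_min xs j hxs2 (by omega)]
      unfold pvAddTerm
      rw [hinv1, hinv2, hinv3]
      by_cases hja : j = pvArg xs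
      · simp [hja]
      · have : (j : Int) ≠ (pvArg xs : Int) := by
          simpa using hja
        simp [this, hja]
    have hrow : pvRowA m cm r =
        (pvRowB m prevB r,
         pvTTGo ((none, -1), (none, -1)) 0
           ((List.range m).map (fun j => r.getD j 0 + pvAddTerm cm (j : Int)))) := by
      rw [rowA_split, pvRowB]
      rw [List.map_congr_left hvals]
    have hrm : m ≤ r.length := hrl r List.mem_cons_self
    have hnewlen : m ≤ (pvRowB m prevB r).length := by
      rw [pvRowB]; simp
    have hvalsne : ((List.range m).map
        (fun j => r.getD j 0 + pvAddTerm cm (j : Int))) ≠ [] := by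
      simp; omega
    have htake : (pvRowB m prevB r).take m
        = (List.range m).map (fun j => r.getD j 0 + pvAddTerm cm (j : Int)) := by
      rw [pvRowB, ← List.map_congr_left hvals]
      rw [List.take_append_of_le_length (by simp)]
      simp
    have hchar := tt_char _ hvalsne
    have hinv' : pvTTInv ((pvRowB m prevB r).take m)
        (pvTTGo ((none, -1), (none, -1)) 0
          ((List.range m).map (fun j => r.getD j 0 + pvAddTerm cm (j : Int)))) := by
      rw [htake]
      refine ⟨?_, ?_, ?_⟩
      · rw [hchar.1]
      · rw [hchar.1]
      · rw [hchar.2]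
        have : ((List.range m).map
            (fun j => r.getD j 0 + pvAddTerm cm (j : Int))).length = m := by simp
        rw [if_neg (by omega)]
    simp only [List.foldl_cons, heq, hrow]
    exact ih _ _ _ hnewlen (fun r' hr' => hrl r' (List.mem_cons_of_mem _ hr')) rfl hinv'

-- ===== VERDICT (by name: the statement is the Claim_ definition above) =====
theorem min_cost_coloring_spec : Claim_equal_min_cost_coloring := by
  intro dp _ hpre
  unfold Spec_min_cost_coloring
  cases dp with
  | nil => simp [min_cost_coloring, min_cost_coloring_alt]
  | cons r0 rest =>
    by_cases hm : r0.length < 2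
    · simp [min_cost_coloring, min_cost_coloring_alt, hm]
    · push_neg at hm
      have hrl : ∀ r ∈ r0 :: rest, r0.length ≤ r.length := by
        rcases hpre with h | h | h
        · simp at h
        · simp at h; omega
        · simpa using h
      rw [min_cost_coloring, min_cost_coloring_alt]
      rw [if_neg (by simp), if_neg (by simp; omega), if_neg (by omega)]
      simp only [List.foldl_cons]
      -- first A-iteration leaves r0 unchanged and computes its top-two minima
      have hadd0 : ∀ j ∈ List.range r0.length,
          r0.getD j 0 + pvAddTerm ((some 0, -1), (some 0, -1)) (j : Int) = r0.getD j 0 := by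
        intro j hj
        have : (j : Int) ≠ -1 := by omega
        simp [pvAddTerm, this]
      have hrow0 : pvRowA r0.length ((some 0, -1), (some 0, -1)) r0 =
          (r0, pvTTGo ((none, -1), (none, -1)) 0 r0) := by
        rw [rowA_split, List.map_congr_left hadd0, map_getD_range]
        simp
      have hr0ne : r0 ≠ [] := by intro hc; rw [hc] at hm; simp at hm
      have hchar := tt_char r0 hr0ne
      have hinv0 : pvTTInv (r0.take r0.length) (pvTTGo ((none, -1), (none, -1)) 0 r0) := by
        rw [List.take_length]
        refine ⟨?_, ?_, ?_⟩
        · rw [hchar.1]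
        · rw [hchar.1]
        · rw [hchar.2, if_neg (by omega)]
      have hhead : ((r0 :: rest).headD []).length = r0.length := by simp
      simp only [hhead]
      rw [hrow0]
      rw [main_loop rest r0.length r0 r0 _ hm (le_refl _)
        (fun r hr => hrl r (List.mem_cons_of_mem _ hr)) rfl hinv0]
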